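-- pv_equiv track=rewrite | github.com/animeshokhade/dsa | scaler/Closest MinMax.py | solve
-- ===== SOURCE A (Python) =====
-- def solve(A):
--     ans = float('inf')
--     maxx, minn = max(A), min(A)
--     latestMax = latestMin = -1
--     for index, number in enumerate(A):
--         if number == maxx:
--             if latestMin != -1:
--                 ans = min(ans, index - latestMin + 1)
--             latestMax = index
--         elif number == minn:
--             if latestMax != -1:
--                 ans = min(ans, index - latestMax + 1)
--             latestMin = index
--     if ans == float('inf'):
--         return 1
--     return ans
-- ===== SOURCE B (Python) =====
-- def solve(A):
--     maxx, minn = max(A), min(A)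
--     if maxx == minn:
--         return 1
--     maxpos = [i for i, x in enumerate(A) if x == maxx]
--     minpos = [i for i, x in enumerate(A) if x == minn]
--     i = j = 0
--     best = abs(maxpos[0] - minpos[0]) + 1
--     while i < len(maxpos) and j < len(minpos):
--         d = abs(maxpos[i] - minpos[j]) + 1
--         if d < best:
--             best = d
--         if maxpos[i] < minpos[j]:
--             i += 1
--         else:
--             j += 1
--     return best
-- ===== Notes on version B (the rewrite author's own statement) =====
-- stated objective: alternative
-- what changed: Replaces the single pass that tracks the latest min/max positions with a build-index-tables-then-two-pointer-merge decomposition: collect the positions of the min and of the max, then merge the two ascending position lists keeping the best window.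
import Mathlib
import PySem

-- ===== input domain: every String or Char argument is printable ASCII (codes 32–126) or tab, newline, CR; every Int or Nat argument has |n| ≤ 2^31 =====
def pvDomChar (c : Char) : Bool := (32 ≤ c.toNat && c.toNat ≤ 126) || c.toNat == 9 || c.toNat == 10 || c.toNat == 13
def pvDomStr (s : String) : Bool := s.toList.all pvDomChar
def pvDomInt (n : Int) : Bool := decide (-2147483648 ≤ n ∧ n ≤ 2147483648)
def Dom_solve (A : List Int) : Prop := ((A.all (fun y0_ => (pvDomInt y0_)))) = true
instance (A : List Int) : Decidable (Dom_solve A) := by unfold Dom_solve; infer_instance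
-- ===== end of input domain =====

-- B replaces A's latest-position single pass by a build-position-tables-then-two-pointer-merge
-- decomposition (alternative decomposition; same asymptotic cost).

-- ===== PORT A =====
-- A's loop body; ans : Option Int where none is float('inf')

def solveStep (maxx minn : Int) (st : Option Int × Int × Int) (iv : Int × Int) :
    Option Int × Int × Int :=
  let ans := st.1
  let latestMax := st.2.1
  let latestMin := st.2.2
  let index := iv.1
  let number := iv.2
  if number = maxx then
    ((if latestMin ≠ -1 then
        some (match ans with
              | none => index - latestMin + 1
              | some a => min a (index - latestMin + 1))
      else ans), index, latestMin)
  else if number = minn then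
    ((if latestMax ≠ -1 then
        some (match ans with
              | none => index - latestMax + 1
              | some a => min a (index - latestMax + 1))
      else ans), latestMax, index)
  else st

-- the loop invariant of A's pass: the two latest pointers are the largest max/min positions
-- seen so far, and ans is the least cross-window over the seen prefix


-- max(A) / min(A) raise ValueError on empty A: excluded by Pre_solve (getD default unreached)

def solve (A : List Int) : Int :=
  let maxx := (PySem.List.max? A (fun x => x)).getD 0
  let minn := (PySem.List.min? A (fun x => x)).getD 0
  let st := (PySem.List.enumerate A 0).foldl (solveStep maxx minn) (none, -1, -1)
  match st.1 with
  | none => 1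
  | some a => a


-- ===== PORT B =====
-- Source B's while loop over the two position pointers, as recursion on the two suffixes

def tpLoop : List Int → List Int → Int → Int
  | p :: ps, q :: qs, best =>
      let d := |p - q| + 1
      let best' := if d < best then d else best
      if p < q then tpLoop ps (q :: qs) best' else tpLoop (p :: ps) qs best'
  | _, _, best => best
  termination_by ps qs _ => ps.length + qs.length


-- maxpos[0] / minpos[0] read via pyGetD; both lists are nonempty when maxx ≠ minn

def solve_alt (A : List Int) : Int :=
  let maxx := (PySem.List.max? A (fun x => x)).getD 0
  let minn := (PySem.List.min? A (fun x => x)).getD 0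
  if maxx = minn then 1
  else
    let maxpos := ((PySem.List.enumerate A 0).filter (fun p => p.2 == maxx)).map (·.1)
    let minpos := ((PySem.List.enumerate A 0).filter (fun p => p.2 == minn)).map (·.1)
    let best := |PySem.List.pyGetD maxpos 0 0 - PySem.List.pyGetD minpos 0 0| + 1
    tpLoop maxpos minpos best


-- ===== PRECONDITION & SPEC =====
-- Pre_ excludes only the empty list, on which Python's max(A) raises ValueError (in A and in B alike).
def Pre_solve (A : List Int) : Prop := A ≠ []
instance (A : List Int) : Decidable (Pre_solve A) := by unfold Pre_solve; infer_instance

def pvWitness_solve : List Int := [3, 1, 2, 3, 1]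

def Spec_solve (A : List Int) (out : Int) : Prop := out = solve_alt A
instance (A : List Int) (out : Int) : Decidable (Spec_solve A out) := by unfold Spec_solve; infer_instance

-- ===== CLAIM (what is proved, stated in full; the proofs are below) =====
def Claim_equal_solve : Prop := ∀ (A : List Int), Dom_solve A → Pre_solve A → Spec_solve A (solve A)

-- ===== LEMMAS AND PROOFS =====

theorem tpLoop_nil_left (qs : List Int) (b : Int) : tpLoop [] qs b = b := by
  cases qs <;> simp [tpLoop]

theorem tpLoop_nil_right (ps : List Int) (b : Int) : tpLoop ps [] b = b := by
  cases ps <;> simp [tpLoop]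

theorem tpLoop_cons (p q : Int) (ps qs : List Int) (b : Int) :
    tpLoop (p :: ps) (q :: qs) b =
      if p < q then tpLoop ps (q :: qs) (if |p - q| + 1 < b then |p - q| + 1 else b)
      else tpLoop (p :: ps) qs (if |p - q| + 1 < b then |p - q| + 1 else b) := by
  rw [tpLoop]

theorem tpLoop_le_init (ps qs : List Int) (b : Int) : tpLoop ps qs b ≤ b := by
  induction ps, qs, b using tpLoop.induct with
  | case1 p ps q qs best d best' h ih =>
      rw [tpLoop_cons, if_pos h]
      have he : (if |p - q| + 1 < best then |p - q| + 1 else best) = best' := by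
        simp [best', d]
      rw [he]
      exact le_trans ih (by simp only [best']; split <;> omega)
  | case2 p ps q qs best d best' h ih =>
      rw [tpLoop_cons, if_neg h]
      have he : (if |p - q| + 1 < best then |p - q| + 1 else best) = best' := by
        simp [best', d]
      rw [he]
      exact le_trans ih (by simp only [best']; split <;> omega)
  | case3 x x1 best h =>
      cases x with
      | nil => rw [tpLoop_nil_left]
      | cons p ps => cases x1 with
        | nil => rw [tpLoop_nil_right]
        | cons q qs => exact (h p ps q qs rfl rfl).elim

theorem tpLoop_mem (ps qs : List Int) (b : Int) :
    tpLoop ps qs b = b ∨ ∃ p ∈ ps, ∃ q ∈ qs, tpLoop ps qs b = |p - q| + 1 := by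
  induction ps, qs, b using tpLoop.induct with
  | case1 p ps q qs best d best' h ih =>
      rw [tpLoop_cons, if_pos h]
      have he : (if |p - q| + 1 < best then |p - q| + 1 else best) = best' := by
        simp [best', d]
      rw [he]
      rcases ih with heq | ⟨p', hp', q', hq', heq⟩
      · by_cases hd : d < best
        · right
          exact ⟨p, List.mem_cons_self, q, List.mem_cons_self, by
            rw [heq]; simp [best', d, hd]⟩
        · left
          rw [heq]; simp [best', d, hd]
      · right
        exact ⟨p', List.mem_cons_of_mem _ hp', q', hq', heq⟩
  | case2 p ps q qs best d best' h ih =>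
      rw [tpLoop_cons, if_neg h]
      have he : (if |p - q| + 1 < best then |p - q| + 1 else best) = best' := by
        simp [best', d]
      rw [he]
      rcases ih with heq | ⟨p', hp', q', hq', heq⟩
      · by_cases hd : d < best
        · right
          exact ⟨p, List.mem_cons_self, q, List.mem_cons_self, by
            rw [heq]; simp [best', d, hd]⟩
        · left
          rw [heq]; simp [best', d, hd]
      · right
        exact ⟨p', hp', q', List.mem_cons_of_mem _ hq', heq⟩
  | case3 x x1 best h =>
      cases x with
      | nil => left; rw [tpLoop_nil_left]
      | cons p ps => cases x1 with
        | nil => left; rw [tpLoop_nil_right]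
        | cons q qs => exact (h p ps q qs rfl rfl).elim

theorem tpLoop_lb (ps qs : List Int) (b : Int)
    (hp : ps.Pairwise (· ≤ ·)) (hq : qs.Pairwise (· ≤ ·)) :
    ∀ p' ∈ ps, ∀ q' ∈ qs, tpLoop ps qs b ≤ |p' - q'| + 1 := by
  induction ps, qs, b using tpLoop.induct with
  | case1 p ps q qs best d best' h ih =>
      intro p' hp' q' hq'
      rw [tpLoop_cons, if_pos h]
      have he : (if |p - q| + 1 < best then |p - q| + 1 else best) = best' := by
        simp [best', d]
      rw [he]
      rcases List.mem_cons.1 hp' with rfl | hp'' 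
      · -- p' = p : dominated by the (p, q) candidate already folded into best'
        have hqq : q ≤ q' := by
          rcases List.mem_cons.1 hq' with rfl | hq'' 
          · rfl
          · exact (List.pairwise_cons.1 hq).1 _ hq''
        have h1 : best' ≤ |p' - q| + 1 := by simp only [best', d]; split <;> omega
        have h2 : |p' - q| + 1 ≤ |p' - q'| + 1 := by
          rw [abs_of_neg (by omega), abs_of_neg (by omega)]; omega
        exact le_trans (le_trans (tpLoop_le_init _ _ _) h1) h2
      · exact ih (List.pairwise_cons.1 hp).2 hq p' hp'' q' hq'
  | case2 p ps q qs best d best' h ih =>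
      intro p' hp' q' hq'
      rw [tpLoop_cons, if_neg h]
      have he : (if |p - q| + 1 < best then |p - q| + 1 else best) = best' := by
        simp [best', d]
      rw [he]
      rcases List.mem_cons.1 hq' with rfl | hq'' 
      · have hpp : p ≤ p' := by
          rcases List.mem_cons.1 hp' with rfl | hp'' 
          · rfl
          · exact (List.pairwise_cons.1 hp).1 _ hp''
        have h1 : best' ≤ |p - q'| + 1 := by simp only [best', d]; split <;> omega
        have h2 : |p - q'| + 1 ≤ |p' - q'| + 1 := by
          rw [abs_of_nonneg (by omega), abs_of_nonneg (by omega)]; omega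
        exact le_trans (le_trans (tpLoop_le_init _ _ _) h1) h2
      · exact ih hp (List.pairwise_cons.1 hq).2 p' hp' q' hq''
  | case3 x x1 best h =>
      intro p' hp' q' hq'
      cases x with
      | nil => cases hp'
      | cons p ps => cases x1 with
        | nil => cases hq'
        | cons q qs => exact (h p ps q qs rfl rfl).elim

def InvSt (maxx minn : Int) (seen : List (Int × Int)) (st : Option Int × Int × Int) : Prop :=
  ((st.2.1 = -1 ∧ ∀ iv ∈ seen, iv.2 ≠ maxx) ∨
    (0 ≤ st.2.1 ∧ (st.2.1, maxx) ∈ seen ∧ ∀ iv ∈ seen, iv.2 = maxx → iv.1 ≤ st.2.1)) ∧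
  ((st.2.2 = -1 ∧ ∀ iv ∈ seen, iv.2 ≠ minn) ∨
    (0 ≤ st.2.2 ∧ (st.2.2, minn) ∈ seen ∧ ∀ iv ∈ seen, iv.2 = minn → iv.1 ≤ st.2.2)) ∧
  ((st.1 = none ∧ ((∀ iv ∈ seen, iv.2 ≠ maxx) ∨ (∀ iv ∈ seen, iv.2 ≠ minn))) ∨
    (∃ a, st.1 = some a ∧
      (∃ p q, (p, maxx) ∈ seen ∧ (q, minn) ∈ seen ∧ a = |p - q| + 1) ∧
      (∀ p q, (p, maxx) ∈ seen → (q, minn) ∈ seen → a ≤ |p - q| + 1)))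

theorem foldA_inv (maxx minn : Int) (hne : maxx ≠ minn) :
    ∀ (l seen : List (Int × Int)) (st : Option Int × Int × Int),
    (∀ iv ∈ seen ++ l, 0 ≤ iv.1) →
    ((seen ++ l).Pairwise (fun a b => a.1 < b.1)) →
    InvSt maxx minn seen st →
    InvSt maxx minn (seen ++ l) (l.foldl (solveStep maxx minn) st) := by
  intro l
  induction l with
  | nil => intro seen st _ _ h; simpa using h
  | cons iv t ih =>
      intro seen st hpos hinc hI
      obtain ⟨i, x⟩ := iv
      obtain ⟨hM, hm, hA⟩ := hI
      have hseen_lt : ∀ jv ∈ seen, jv.1 < i := by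
        intro jv hjv
        exact (List.pairwise_append.1 hinc).2.2 jv hjv (i, x) List.mem_cons_self
      have h0i : 0 ≤ i := hpos (i, x) (by simp)
      have hassoc : seen ++ (i, x) :: t = (seen ++ [(i, x)]) ++ t := by simp
      rw [List.foldl_cons, hassoc]
      apply ih
      · rw [← hassoc]; exact hpos
      · rw [← hassoc]; exact hinc
      · -- InvSt for seen ++ [(i,x)] and the stepped state
        by_cases hx : maxx = x
        · -- max branch
          subst hx
          have step_eq : solveStep maxx minn st (i, maxx) =
              ((if st.2.2 ≠ -1 then
                  some (match st.1 with
                        | none => i - st.2.2 + 1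
                        | some a => min a (i - st.2.2 + 1))
                else st.1), i, st.2.2) := by
            simp [solveStep]
          rw [step_eq]
          have hMnew : ((((if st.2.2 ≠ -1 then
                  some (match st.1 with
                        | none => i - st.2.2 + 1
                        | some a => min a (i - st.2.2 + 1))
                else st.1), i, st.2.2) : Option Int × Int × Int).2.1 = -1 ∧
                ∀ jv ∈ seen ++ [(i, maxx)], jv.2 ≠ maxx) ∨
              (0 ≤ (((if st.2.2 ≠ -1 then
                  some (match st.1 with
                        | none => i - st.2.2 + 1
                        | some a => min a (i - st.2.2 + 1))
                else st.1), i, st.2.2) : Option Int × Int × Int).2.1 ∧ ((i : Int), maxx) ∈ seen ++ [(i, maxx)] ∧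
                ∀ jv ∈ seen ++ [(i, maxx)], jv.2 = maxx → jv.1 ≤ i) := by
            right
            refine ⟨h0i, by simp, ?_⟩
            intro jv hjv _
            rcases List.mem_append.1 hjv with h' | h'
            · exact le_of_lt (hseen_lt _ h')
            · simp at h'; subst h'; simp
          by_cases hlm : st.2.2 = -1
          · -- no min seen yet: ans unchanged, latestMin unchanged
            have hmL : ∀ jv ∈ seen, jv.2 ≠ minn := by
              rcases hm with ⟨_, h⟩ | ⟨h0, _, _⟩
              · exact h
              · omega
            have hmL' : ∀ jv ∈ seen ++ [(i, maxx)], jv.2 ≠ minn := by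
              intro jv hjv
              rcases List.mem_append.1 hjv with h' | h'
              · exact hmL _ h'
              · simp at h'; subst h'; simpa using hne
            refine ⟨hMnew, ?_, ?_⟩
            · left
              exact ⟨by simp [hlm], hmL'⟩
            · -- ans unchanged (branch not taken)
              simp only [hlm]
              rcases hA with ⟨h1, _⟩ | ⟨a, h1, ⟨p, q, hp, hq, hval⟩, hmin⟩
              · left
                exact ⟨by simpa using h1, Or.inr hmL'⟩
              · exact absurd rfl (hmL _ hq)
          · -- a min was seen: candidate i - lm + 1 recorded
            have hmR : 0 ≤ st.2.2 ∧ (st.2.2, minn) ∈ seen ∧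
                ∀ jv ∈ seen, jv.2 = minn → jv.1 ≤ st.2.2 := by
              rcases hm with ⟨h1, _⟩ | h
              · exact absurd h1 hlm
              · exact h
            have hlm_lt : st.2.2 < i := by
              have := hseen_lt (st.2.2, minn) hmR.2.1; simpa using this
            have hq_new : ∀ q, ((q : Int), minn) ∈ seen ++ [(i, maxx)] → (q, minn) ∈ seen := by
              intro q hq
              rcases List.mem_append.1 hq with h' | h'
              · exact h'
              · simp at h'; exact absurd h'.2.symm hne
            refine ⟨hMnew, ?_, ?_⟩
            · right
              refine ⟨hmR.1, List.mem_append_left _ hmR.2.1, ?_⟩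
              intro jv hjv h2
              dsimp only
              rcases List.mem_append.1 hjv with h' | h'
              · exact hmR.2.2 _ h' h2
              · simp at h'; subst h'; simp at h2; exact absurd h2 hne
            · right
              simp only [hlm, if_pos, ne_eq, not_false_iff]
              rcases hA with ⟨hnone, hside⟩ | ⟨a, hsome, ⟨p, q, hp, hq, hval⟩, hmin⟩
              · -- ans was none: new ans = i - lm + 1
                have hmaxL : ∀ jv ∈ seen, jv.2 ≠ maxx := by
                  rcases hside with h | h
                  · exact h
                  · exact absurd rfl (h _ hmR.2.1)
                refine ⟨i - st.2.2 + 1, by rw [hnone], ?_, ?_⟩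
                · exact ⟨i, st.2.2, by simp, List.mem_append_left _ hmR.2.1,
                    by rw [abs_of_nonneg (by omega)]⟩
                · intro p q hp hq
                  have hq' := hq_new q hq
                  have hqle : q ≤ st.2.2 := hmR.2.2 _ hq' rfl
                  have hqi : q < i := by have := hseen_lt (q, minn) hq'; simpa using this
                  have hpi : p = i := by
                    rcases List.mem_append.1 hp with h' | h'
                    · exact absurd rfl (hmaxL _ h')
                    · simp at h'; exact h'
                  subst hpi
                  rw [abs_of_nonneg (by omega)]; omega
              · -- ans was some a: new ans = min a (i - lm + 1)
                refine ⟨min a (i - st.2.2 + 1), by rw [hsome], ?_, ?_⟩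
                · rcases le_total a (i - st.2.2 + 1) with hle | hge
                  · exact ⟨p, q, List.mem_append_left _ hp, List.mem_append_left _ hq,
                      by rw [min_eq_left hle]; exact hval⟩
                  · exact ⟨i, st.2.2, by simp, List.mem_append_left _ hmR.2.1,
                      by rw [min_eq_right hge, abs_of_nonneg (by omega)]⟩
                · intro p' q' hp' hq'
                  have hq'' := hq_new q' hq'
                  have hqle : q' ≤ st.2.2 := hmR.2.2 _ hq'' rfl
                  have hqi : q' < i := by have := hseen_lt (q', minn) hq''; simpa using this
                  rcases List.mem_append.1 hp' with h' | h'
                  · exact le_trans (min_le_left _ _) (hmin _ _ h' hq'')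
                  · simp at h'
                    rw [h', abs_of_nonneg (by omega)]
                    exact le_trans (min_le_right _ _) (by omega)
        · by_cases hx' : minn = x
          · -- min branch (mirror)
            subst hx'
            have step_eq : solveStep maxx minn st (i, minn) =
                ((if st.2.1 ≠ -1 then
                    some (match st.1 with
                          | none => i - st.2.1 + 1
                          | some a => min a (i - st.2.1 + 1))
                  else st.1), st.2.1, i) := by
              simp [solveStep, Ne.symm hne]
            rw [step_eq]
            have hmnew : ((((if st.2.1 ≠ -1 then
                    some (match st.1 with
                          | none => i - st.2.1 + 1
                          | some a => min a (i - st.2.1 + 1))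
                  else st.1), st.2.1, i) : Option Int × Int × Int).2.2 = -1 ∧
                  ∀ jv ∈ seen ++ [(i, minn)], jv.2 ≠ minn) ∨
                (0 ≤ (((if st.2.1 ≠ -1 then
                    some (match st.1 with
                          | none => i - st.2.1 + 1
                          | some a => min a (i - st.2.1 + 1))
                  else st.1), st.2.1, i) : Option Int × Int × Int).2.2 ∧ ((i : Int), minn) ∈ seen ++ [(i, minn)] ∧
                  ∀ jv ∈ seen ++ [(i, minn)], jv.2 = minn → jv.1 ≤ i) := by
              right
              refine ⟨h0i, by simp, ?_⟩
              intro jv hjv _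
              rcases List.mem_append.1 hjv with h' | h'
              · exact le_of_lt (hseen_lt _ h')
              · simp at h'; subst h'; simp
            by_cases hlM : st.2.1 = -1
            · have hML : ∀ jv ∈ seen, jv.2 ≠ maxx := by
                rcases hM with ⟨_, h⟩ | ⟨h0, _, _⟩
                · exact h
                · omega
              have hML' : ∀ jv ∈ seen ++ [(i, minn)], jv.2 ≠ maxx := by
                intro jv hjv
                rcases List.mem_append.1 hjv with h' | h'
                · exact hML _ h'
                · simp at h'; subst h'; simpa using Ne.symm hne
              refine ⟨?_, hmnew, ?_⟩
              · left
                exact ⟨by simp [hlM], hML'⟩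
              · simp only [hlM]
                rcases hA with ⟨h1, _⟩ | ⟨a, h1, ⟨p, q, hp, hq, hval⟩, hmin⟩
                · left
                  exact ⟨by simpa using h1, Or.inl hML'⟩
                · exact absurd rfl (hML _ hp)
            · have hMR : 0 ≤ st.2.1 ∧ (st.2.1, maxx) ∈ seen ∧
                  ∀ jv ∈ seen, jv.2 = maxx → jv.1 ≤ st.2.1 := by
                rcases hM with ⟨h1, _⟩ | h
                · exact absurd h1 hlM
                · exact h
              have hlM_lt : st.2.1 < i := by
                have := hseen_lt (st.2.1, maxx) hMR.2.1; simpa using this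
              have hp_new : ∀ p, ((p : Int), maxx) ∈ seen ++ [(i, minn)] → (p, maxx) ∈ seen := by
                intro p hp
                rcases List.mem_append.1 hp with h' | h'
                · exact h'
                · simp at h'; exact absurd h'.2.symm (Ne.symm hne)
              refine ⟨?_, hmnew, ?_⟩
              · right
                refine ⟨hMR.1, List.mem_append_left _ hMR.2.1, ?_⟩
                intro jv hjv h2
                dsimp only
                rcases List.mem_append.1 hjv with h' | h'
                · exact hMR.2.2 _ h' h2
                · simp at h'; subst h'; simp at h2; exact absurd h2.symm hne
              · right
                simp only [hlM, if_pos, ne_eq, not_false_iff]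
                rcases hA with ⟨hnone, hside⟩ | ⟨a, hsome, ⟨p, q, hp, hq, hval⟩, hmin⟩
                · have hminL : ∀ jv ∈ seen, jv.2 ≠ minn := by
                    rcases hside with h | h
                    · exact absurd rfl (h _ hMR.2.1)
                    · exact h
                  refine ⟨i - st.2.1 + 1, by rw [hnone], ?_, ?_⟩
                  · exact ⟨st.2.1, i, List.mem_append_left _ hMR.2.1, by simp,
                      by rw [abs_of_nonpos (by omega)]; omega⟩
                  · intro p q hp hq
                    have hp' := hp_new p hp
                    have hple : p ≤ st.2.1 := hMR.2.2 _ hp' rfl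
                    have hpi : p < i := by have := hseen_lt (p, maxx) hp'; simpa using this
                    have hqi : q = i := by
                      rcases List.mem_append.1 hq with h' | h'
                      · exact absurd rfl (hminL _ h')
                      · simp at h'; exact h'
                    subst hqi
                    rw [abs_of_nonpos (by omega)]; omega
                · refine ⟨min a (i - st.2.1 + 1), by rw [hsome], ?_, ?_⟩
                  · rcases le_total a (i - st.2.1 + 1) with hle | hge
                    · exact ⟨p, q, List.mem_append_left _ hp, List.mem_append_left _ hq,
                        by rw [min_eq_left hle]; exact hval⟩
                    · exact ⟨st.2.1, i, List.mem_append_left _ hMR.2.1, by simp,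
                        by rw [min_eq_right hge, abs_of_nonpos (by omega)]; omega⟩
                  · intro p' q' hp' hq'
                    have hp'' := hp_new p' hp'
                    have hple : p' ≤ st.2.1 := hMR.2.2 _ hp'' rfl
                    have hpi : p' < i := by have := hseen_lt (p', maxx) hp''; simpa using this
                    rcases List.mem_append.1 hq' with h' | h'
                    · exact le_trans (min_le_left _ _) (hmin _ _ hp'' h')
                    · simp at h'
                      rw [h', abs_of_nonpos (by omega)]
                      exact le_trans (min_le_right _ _) (by omega)
          · -- neither branch: state unchanged
            have step_eq : solveStep maxx minn st (i, x) = st := by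
              simp [solveStep, Ne.symm hx, Ne.symm hx']
            rw [step_eq]
            have hnotmax : ∀ jv ∈ seen ++ [(i, x)], jv.2 = maxx → jv ∈ seen := by
              intro jv hjv h2
              rcases List.mem_append.1 hjv with h' | h'
              · exact h'
              · simp at h'; subst h'; simp at h2; exact absurd h2.symm hx
            have hnotmin : ∀ jv ∈ seen ++ [(i, x)], jv.2 = minn → jv ∈ seen := by
              intro jv hjv h2
              rcases List.mem_append.1 hjv with h' | h'
              · exact h'
              · simp at h'; subst h'; simp at h2; exact absurd h2.symm hx'
            refine ⟨?_, ?_, ?_⟩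
            · rcases hM with ⟨h1, h2⟩ | ⟨h1, h2, h3⟩
              · left
                exact ⟨h1, fun jv hjv hc => h2 _ (hnotmax _ hjv hc) hc⟩
              · right
                exact ⟨h1, List.mem_append_left _ h2, fun jv hjv hc => h3 _ (hnotmax _ hjv hc) hc⟩
            · rcases hm with ⟨h1, h2⟩ | ⟨h1, h2, h3⟩
              · left
                exact ⟨h1, fun jv hjv hc => h2 _ (hnotmin _ hjv hc) hc⟩
              · right
                exact ⟨h1, List.mem_append_left _ h2, fun jv hjv hc => h3 _ (hnotmin _ hjv hc) hc⟩
            · rcases hA with ⟨h1, h2⟩ | ⟨a, h1, ⟨p, q, hp, hq, hval⟩, hmin⟩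
              · left
                refine ⟨h1, ?_⟩
                rcases h2 with h | h
                · exact Or.inl (fun jv hjv hc => h _ (hnotmax _ hjv hc) hc)
                · exact Or.inr (fun jv hjv hc => h _ (hnotmin _ hjv hc) hc)
              · right
                refine ⟨a, h1, ⟨p, q, List.mem_append_left _ hp, List.mem_append_left _ hq, hval⟩, ?_⟩
                intro p' q' hp' hq'
                exact hmin _ _ (hnotmax _ hp' rfl) (hnotmin _ hq' rfl)

theorem mem_enumerate_of_mem {A : List Int} {x : Int} (h : x ∈ A) (s : Int) :
    ∃ i, (i, x) ∈ PySem.List.enumerate A s := by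
  induction A generalizing s with
  | nil => cases h
  | cons a t ih =>
      rw [PySem.List.enumerate_cons]
      rcases List.mem_cons.1 h with rfl | h'
      · exact ⟨s, List.mem_cons_self⟩
      · obtain ⟨i, hi⟩ := ih h' (s + 1); exact ⟨i, List.mem_cons_of_mem _ hi⟩

theorem snd_mem_of_mem_enumerate {A : List Int} {iv : Int × Int} {s : Int}
    (h : iv ∈ PySem.List.enumerate A s) : iv.2 ∈ A := by
  induction A generalizing s with
  | nil => simp [PySem.List.enumerate_nil] at h
  | cons a t ih =>
      rw [PySem.List.enumerate_cons] at h
      rcases List.mem_cons.1 h with rfl | h'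
      · simp
      · exact List.mem_cons_of_mem _ (ih h')

theorem fst_mem_enumerate_ge {A : List Int} {iv : Int × Int} {s : Int}
    (h : iv ∈ PySem.List.enumerate A s) : s ≤ iv.1 := by
  induction A generalizing s with
  | nil => simp [PySem.List.enumerate_nil] at h
  | cons a t ih =>
      rw [PySem.List.enumerate_cons] at h
      rcases List.mem_cons.1 h with rfl | h'
      · simp
      · exact le_trans (by omega) (ih h')

theorem pairwise_fst_enumerate (A : List Int) (s : Int) :
    (PySem.List.enumerate A s).Pairwise (fun a b => a.1 < b.1) := by
  induction A generalizing s with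
  | nil => simp [PySem.List.enumerate_nil]
  | cons a t ih =>
      rw [PySem.List.enumerate_cons]
      exact List.pairwise_cons.2
        ⟨fun b hb => lt_of_lt_of_le (by omega) (fst_mem_enumerate_ge hb), ih (s + 1)⟩

theorem mem_posOf (P : List (Int × Int)) (v r : Int) :
    r ∈ (P.filter (fun p => p.2 == v)).map (·.1) ↔ (r, v) ∈ P := by
  simp only [List.mem_map, List.mem_filter, beq_iff_eq]
  constructor
  · rintro ⟨⟨a, b⟩, ⟨hmem, hb⟩, ha⟩
    simp at hb ha
    rw [← ha, ← hb]
    exact hmem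
  · intro h
    exact ⟨(r, v), ⟨h, rfl⟩, rfl⟩

theorem pairwise_le_posOf (A : List Int) (v : Int) :
    (((PySem.List.enumerate A 0).filter (fun p => p.2 == v)).map (·.1)).Pairwise (· ≤ ·) := by
  have h1 : ((PySem.List.enumerate A 0).filter (fun p => p.2 == v)).Pairwise
      (fun a b => a.1 < b.1) :=
    List.Pairwise.sublist (List.filter_sublist (p := fun p : Int × Int => p.2 == v))
      (pairwise_fst_enumerate A 0)
  exact (List.pairwise_map.2 h1).imp (fun h => le_of_lt h)

-- degenerate case: if every element equals maxx, the elif never fires and ans stays none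

theorem fold_all_max (maxx minn : Int) :
    ∀ (l : List (Int × Int)) (lM : Int), (∀ iv ∈ l, iv.2 = maxx) →
    ∃ lM', l.foldl (solveStep maxx minn) (none, lM, -1) = (none, lM', -1) := by
  intro l
  induction l with
  | nil => exact fun lM _ => ⟨lM, rfl⟩
  | cons iv t ih =>
      intro lM hall
      obtain ⟨i, x⟩ := iv
      have hx : x = maxx := hall (i, x) List.mem_cons_self
      have hstep : solveStep maxx minn (none, lM, -1) (i, x) = (none, i, -1) := by
        simp [solveStep, hx]
      rw [List.foldl_cons, hstep]
      exact ih i (fun jv hjv => hall jv (List.mem_cons_of_mem _ hjv))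

theorem solve_eq (A : List Int) (h : A ≠ []) : solve A = solve_alt A := by
  obtain ⟨mx, hmx⟩ : ∃ mx, PySem.List.max? A (fun x => x) = some mx := by
    cases hc : PySem.List.max? A (fun x => x) with
    | none => exact absurd ((PySem.List.max?_eq_none_iff A _).1 hc) h
    | some m => exact ⟨m, rfl⟩
  obtain ⟨mn, hmn⟩ : ∃ mn, PySem.List.min? A (fun x => x) = some mn := by
    cases hc : PySem.List.min? A (fun x => x) with
    | none => exact absurd ((PySem.List.min?_eq_none_iff A _).1 hc) h
    | some m => exact ⟨m, rfl⟩
  by_cases heq : mx = mn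
  · -- all elements equal: A's loop records nothing, B short-circuits
    have hall : ∀ iv ∈ PySem.List.enumerate A 0, iv.2 = mx := by
      intro iv hiv
      have hmem := snd_mem_of_mem_enumerate hiv
      have h1 := PySem.List.max?_isMax hmx iv.2 hmem
      have h2 := PySem.List.min?_isMin hmn iv.2 hmem
      simp at h1 h2
      omega
    obtain ⟨lM', hfold⟩ := fold_all_max mx mn (PySem.List.enumerate A 0) (-1) hall
    have h1 : solve A = 1 := by
      simp only [solve, hmx, hmn, Option.getD_some, hfold]
    have h2 : solve_alt A = 1 := by
      simp [solve_alt, hmx, hmn, heq]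
    rw [h1, h2]
  · -- distinct max and min: both sides compute the least window over all cross pairs
    have hInv := foldA_inv mx mn heq (PySem.List.enumerate A 0) [] (none, -1, -1)
      (by intro iv hiv; simpa using fst_mem_enumerate_ge (by simpa using hiv))
      (by simpa using pairwise_fst_enumerate A 0)
      ⟨Or.inl ⟨rfl, by simp⟩, Or.inl ⟨rfl, by simp⟩, Or.inl ⟨rfl, Or.inl (by simp)⟩⟩
    simp only [List.nil_append] at hInv
    obtain ⟨pM, hpM⟩ := mem_enumerate_of_mem (PySem.List.max?_mem hmx) 0
    obtain ⟨qm, hqm⟩ := mem_enumerate_of_mem (PySem.List.min?_mem hmn) 0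
    obtain ⟨_, _, hA⟩ := hInv
    rcases hA with ⟨_, hside⟩ | ⟨a, hsome, ⟨p, q, hp, hq, hval⟩, hmin⟩
    · rcases hside with hs | hs
      · exact absurd rfl (hs _ hpM)
      · exact absurd rfl (hs _ hqm)
    · -- A returns a, the least cross window
      have hsolve : solve A = a := by
        simp only [solve, hmx, hmn, Option.getD_some, hsome]
      -- B side
      have hmaxne : ((PySem.List.enumerate A 0).filter (fun p => p.2 == mx)).map (·.1) ≠ [] := by
        intro hnil
        have := (mem_posOf (PySem.List.enumerate A 0) mx pM).2 hpM
        rw [hnil] at this; cases this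
      have hminne : ((PySem.List.enumerate A 0).filter (fun p => p.2 == mn)).map (·.1) ≠ [] := by
        intro hnil
        have := (mem_posOf (PySem.List.enumerate A 0) mn qm).2 hqm
        rw [hnil] at this; cases this
      set maxpos := ((PySem.List.enumerate A 0).filter (fun p => p.2 == mx)).map (·.1) with hmpdef
      set minpos := ((PySem.List.enumerate A 0).filter (fun p => p.2 == mn)).map (·.1) with hnpdef
      obtain ⟨m0, mr, hm0⟩ := List.exists_cons_of_ne_nil hmaxne
      obtain ⟨n0, nr, hn0⟩ := List.exists_cons_of_ne_nil hminne
      have hbest : |PySem.List.pyGetD maxpos 0 0 - PySem.List.pyGetD minpos 0 0| + 1 =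
          |m0 - n0| + 1 := by
        rw [hm0, hn0, PySem.List.pyGetD_zero_cons, PySem.List.pyGetD_zero_cons]
      have halt : solve_alt A = tpLoop maxpos minpos (|m0 - n0| + 1) := by
        simp only [solve_alt, hmx, hmn, Option.getD_some, if_neg heq, ← hmpdef, ← hnpdef, hbest]
      rw [hsolve, halt]
      -- a ≤ r and r ≤ a
      have hm0mem : m0 ∈ maxpos := by rw [hm0]; exact List.mem_cons_self
      have hn0mem : n0 ∈ minpos := by rw [hn0]; exact List.mem_cons_self
      have hsortM : maxpos.Pairwise (· ≤ ·) := pairwise_le_posOf A mx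
      have hsortN : minpos.Pairwise (· ≤ ·) := pairwise_le_posOf A mn
      have hler : a ≤ tpLoop maxpos minpos (|m0 - n0| + 1) := by
        rcases tpLoop_mem maxpos minpos (|m0 - n0| + 1) with hr | ⟨p', hp', q', hq', hr⟩
        · rw [hr]
          exact hmin _ _ ((mem_posOf _ _ _).1 hm0mem) ((mem_posOf _ _ _).1 hn0mem)
        · rw [hr]
          exact hmin _ _ ((mem_posOf _ _ _).1 hp') ((mem_posOf _ _ _).1 hq')
      have hrle : tpLoop maxpos minpos (|m0 - n0| + 1) ≤ a := by
        rw [hval]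
        exact tpLoop_lb maxpos minpos _ hsortM hsortN p ((mem_posOf _ _ _).2 hp)
          q ((mem_posOf _ _ _).2 hq)
      omega

-- ===== VERDICT (by name: the statement is the Claim_ definition above) =====
theorem solve_spec : Claim_equal_solve := by
  intro A _ hpre
  unfold Spec_solve
  exact solve_eq A hpre
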